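-- pv_equiv track=rewrite | github.com/eric25010/HW-Python-Universit- | homework01/program02.py | es2
-- ===== SOURCE A (Python) =====
-- import math
--
-- def es2(N, ins):
--     # inserite qui il vostro codice
--     ins2 = ins.copy()
--     lista_premuti = []
--     while N > 0:
--        if N not in ins2:
--            lista_premuti.append(N)
--            accensioneOSpegnimento(listaDivisori(N), ins2)
--        N-=1
--     return sorted(lista_premuti)
--
-- def listaDivisori(N):
--     l=[n for n in range(1, int(math.sqrt(N)) + 1) if N % n == 0]
--     return aggiuntaLista(N,l)
--
-- def aggiuntaLista(N,l):
--     l2 = l.copy()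
--     l2.reverse()
--     lunghezza = len(l)-1
--     while lunghezza >= 0:
--         if not int(N/l2[lunghezza]) in l:
--             l.append(int(N/l2[lunghezza]))
--         lunghezza-=1
--     return sorted(l)
--
-- def accensioneOSpegnimento(l,ins):
--      for interruttore in l:
--          if interruttore in ins:
--             ins.remove(interruttore)
--          else:
--             ins.add(interruttore)
--      return ins
-- ===== SOURCE B (Python) =====
-- def es2(N, ins):
--     # Descending parity sieve: when n is reached, lamp n's state equals its initial
--     # state toggled once per already-pressed multiple of n, so the pressed flags of
--     # the multiples 2n, 3n, ... <= N decide n directly -- no divisor factorization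
--     # and no mutable lamp-set simulation.
--     if N <= 0:
--         return []
--     pressed = [False] * (N + 1)
--     out = []
--     for n in range(N, 0, -1):
--         par = False
--         for m in range(2 * n, N + 1, n):
--             if pressed[m]:
--                 par = not par
--         if (n in ins) == par:
--             pressed[n] = True
--             out.append(n)
--     out.reverse()
--     return out
-- ===== Notes on version B (the rewrite author's own statement) =====
-- stated objective: faster
-- what changed: A simulates the lamp set top-down, factoring each pressed number into its divisors (sqrt enumeration plus cofactor pass plus a sort per step) and toggling a set; B replaces this with a descending parity sieve: a pressed-flag array is scanned over the multiples 2n, 3n, ... <= N of each n, so no divisor factorization, no sorting and no set simulation occur.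
import Mathlib
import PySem

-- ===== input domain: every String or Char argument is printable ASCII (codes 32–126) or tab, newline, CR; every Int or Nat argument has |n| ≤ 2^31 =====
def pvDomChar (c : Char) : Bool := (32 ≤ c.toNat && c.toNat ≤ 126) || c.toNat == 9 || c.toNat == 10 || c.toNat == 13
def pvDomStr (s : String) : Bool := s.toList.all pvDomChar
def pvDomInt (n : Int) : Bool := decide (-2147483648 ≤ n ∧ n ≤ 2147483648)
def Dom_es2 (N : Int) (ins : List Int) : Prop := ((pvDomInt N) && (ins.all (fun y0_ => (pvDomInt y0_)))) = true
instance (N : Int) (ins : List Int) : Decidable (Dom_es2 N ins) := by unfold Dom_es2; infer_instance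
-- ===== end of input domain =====

-- B replaces A's lamp-set simulation with divisor factorization by a descending
-- parity sieve over pressed multiples (measured faster in a timing run).

-- ===== PORT A =====
-- while lunghezza >= 0 loop of aggiuntaLista; fuel k+1 processes index k, so the
-- first iteration is lunghezza = len(l)-1 exactly as in Python.
-- int(N/l2[lunghezza]) is ported as floor division: exact, because on every call
-- l2[lunghezza] is a positive divisor of N (float true division is then exact).
def aggiuntaListaLoop (N : Int) (l2 : List Int) : Nat → List Int → List Int
  | 0, l => l
  | (k+1), l =>
      let q := PySem.Int.floordiv N (PySem.List.pyGetD l2 (k : Int) 0)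
      aggiuntaListaLoop N l2 k (if q ∈ l then l else l ++ [q])

def aggiuntaLista (N : Int) (l : List Int) : List Int :=
  PySem.List.sorted (aggiuntaListaLoop N l.reverse l.length l) (fun x => x) false

-- int(math.sqrt(N)) is ported as Nat.sqrt: exact on the domain (for 0 ≤ N ≤ 2^31
-- the correctly rounded float sqrt truncates to the integer square root).
def listaDivisori (N : Int) : List Int :=
  aggiuntaLista N ((PySem.List.pyRange 1 ((Nat.sqrt N.toNat : Int) + 1) 1).filter
    (fun n => PySem.Int.mod N n == 0))

-- set.remove under the membership guard is exactly Set.discard (no KeyError).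
def accensioneOSpegnimento (l : List Int) (ins : PySem.Set Int) : PySem.Set Int :=
  l.foldl (fun ins2 interruttore =>
    if PySem.Set.contains ins2 interruttore
    then PySem.Set.discard ins2 interruttore
    else PySem.Set.add ins2 interruttore) ins

-- the 'while N > 0' loop of es2
def es2Loop (N : Int) (ins2 : PySem.Set Int) (lista : List Int) : List Int :=
  if 0 < N then
    if PySem.Set.contains ins2 N
    then es2Loop (N - 1) ins2 lista
    else es2Loop (N - 1) (accensioneOSpegnimento (listaDivisori N) ins2) (lista ++ [N])
  else lista
termination_by N.toNat
decreasing_by all_goals omega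

def es2 (N : Int) (ins : List Int) : List Int :=
  PySem.List.sorted (es2Loop N ins []) (fun x => x) false

-- ===== PORT B =====
-- inner loop 'for m in range(2*n, N+1, n): if pressed[m]: par = not par'
def altPar (pressed : List Bool) (N n : Int) : Bool :=
  (PySem.List.pyRange (2 * n) (N + 1) n).foldl
    (fun par m => if PySem.List.pyGetD pressed m false then !par else par) false

-- body of 'for n in range(N, 0, -1)': state = (pressed, out)
def altStep (ins : List Int) (N : Int) (st : List Bool × List Int) (n : Int) :
    List Bool × List Int :=
  if (decide (n ∈ ins)) == altPar st.1 N n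
  then (PySem.List.pySetD st.1 n true, st.2 ++ [n])
  else st

def es2_alt (N : Int) (ins : List Int) : List Int :=
  if N ≤ 0 then []
  else (((PySem.List.pyRange N 0 (-1)).foldl (altStep ins N)
          (List.replicate (N + 1).toNat false, [])).2).reverse

-- ===== PRECONDITION & SPEC =====
def Spec_es2 (N : Int) (ins : List Int) (out : List Int) : Prop := out = es2_alt N ins
instance (N : Int) (ins : List Int) (out : List Int) : Decidable (Spec_es2 N ins out) := by unfold Spec_es2; infer_instance

-- ===== CLAIM (what is proved, stated in full; the proofs are below) =====
def Claim_equal_es2 : Prop := ∀ (N : Int) (ins : List Int), Dom_es2 N ins → Spec_es2 N ins (es2 N ins)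

-- ===== LEMMAS AND PROOFS =====

theorem mem_aggiuntaListaLoop (N : Int) (l2 : List Int) (k : Nat) (l : List Int) (m : Int) :
    m ∈ aggiuntaListaLoop N l2 k l ↔
      m ∈ l ∨ ∃ j < k, m = PySem.Int.floordiv N (PySem.List.pyGetD l2 (j : Int) 0) := by
  induction k generalizing l with
  | zero => simp [aggiuntaListaLoop]
  | succ k ih =>
    rw [aggiuntaListaLoop, ih]
    have hmem : (m ∈ (if PySem.Int.floordiv N (PySem.List.pyGetD l2 (k : Int) 0) ∈ l then l
        else l ++ [PySem.Int.floordiv N (PySem.List.pyGetD l2 (k : Int) 0)])) ↔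
        m ∈ l ∨ m = PySem.Int.floordiv N (PySem.List.pyGetD l2 (k : Int) 0) := by
      split_ifs with h
      · constructor
        · exact fun hm => Or.inl hm
        · rintro (hm | rfl) <;> [exact hm; exact h]
      · simp
    rw [hmem]
    constructor
    · rintro ((hm | rfl) | ⟨j, hj, rfl⟩)
      · exact Or.inl hm
      · exact Or.inr ⟨k, by omega, rfl⟩
      · exact Or.inr ⟨j, by omega, rfl⟩
    · rintro (hm | ⟨j, hj, rfl⟩)
      · exact Or.inl (Or.inl hm)
      · rcases Nat.lt_succ_iff_lt_or_eq.mp hj with h | rfl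
        · exact Or.inr ⟨j, h, rfl⟩
        · exact Or.inl (Or.inr rfl)

theorem nodup_aggiuntaListaLoop (N : Int) (l2 : List Int) (k : Nat) (l : List Int)
    (h : l.Nodup) : (aggiuntaListaLoop N l2 k l).Nodup := by
  induction k generalizing l with
  | zero => simpa [aggiuntaListaLoop] using h
  | succ k ih =>
    rw [aggiuntaListaLoop]
    apply ih
    split_ifs with hq
    · exact h
    · exact h.append (List.nodup_singleton _) (by simpa using hq)

theorem mem_accensioneOSpegnimento (L : List Int) (S : PySem.Set Int) (m : Int) :
    m ∈ accensioneOSpegnimento L S ↔ ((m ∈ S) ↔ L.count m % 2 = 0) := by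
  induction L generalizing S with
  | nil => simp [accensioneOSpegnimento]
  | cons x t ih =>
    have hstep : accensioneOSpegnimento (x :: t) S
        = accensioneOSpegnimento t
            (if PySem.Set.contains S x then PySem.Set.discard S x else PySem.Set.add S x) := rfl
    rw [hstep, ih]
    have hmem : (m ∈ (if PySem.Set.contains S x then PySem.Set.discard S x
          else PySem.Set.add S x)) ↔ (if x = m then ¬(m ∈ S) else m ∈ S) := by
      split_ifs with hc hx hx
      · subst hx
        rw [PySem.Set.mem_discard]
        have hxS : x ∈ S := by simpa [PySem.Set.contains] using hc
        simp [hxS]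
      · rw [PySem.Set.mem_discard]
        have hmx : m ≠ x := fun h => hx h.symm
        simp [hmx]
      · subst hx
        have hxS : ¬ x ∈ S := by simpa [PySem.Set.contains] using hc
        rw [PySem.Set.mem_add]
        simp [hxS]
      · rw [PySem.Set.mem_add]
        have hmx : m ≠ x := fun h => hx h.symm
        simp [hmx]
    rw [hmem, List.count_cons]
    by_cases hx : x = m <;> by_cases hS : m ∈ S <;>
      simp only [hx, if_pos, if_neg, hS, beq_iff_eq, beq_self_eq_true, not_true, not_false_iff, true_iff, false_iff] <;> by_cases hm : x == m <;>
      simp_all <;> omega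

theorem foldl_flip_parity (L : List Int) (p : Int → Bool) (b : Bool) :
    L.foldl (fun par m => if p m then !par else par) b = (b != (L.countP p % 2 == 1)) := by
  induction L generalizing b with
  | nil => simp
  | cons x t ih =>
    simp only [List.foldl_cons, List.countP_cons, ih]
    by_cases hx : p x
    · have h2 : (t.countP p + 1) % 2 = 1 - t.countP p % 2 := by omega
      simp [hx, h2]
      rcases Nat.mod_two_eq_zero_or_one (t.countP p) with h | h <;> cases b <;> simp [h]
    · simp [hx]

theorem countP_mem_comm (l₁ l₂ : List Int) (h₁ : l₁.Nodup) (h₂ : l₂.Nodup) :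
    l₁.countP (fun x => decide (x ∈ l₂)) = l₂.countP (fun x => decide (x ∈ l₁)) := by
  rw [List.countP_eq_length_filter, List.countP_eq_length_filter]
  have e1 : (l₁.filter (fun x => decide (x ∈ l₂))).length
      = (l₁.toFinset ∩ l₂.toFinset).card := by
    rw [← List.toFinset_card_of_nodup (h₁.filter _), List.toFinset_filter]
    congr 1
    ext x
    simp
  have e2 : (l₂.filter (fun x => decide (x ∈ l₁))).length
      = (l₂.toFinset ∩ l₁.toFinset).card := by
    rw [← List.toFinset_card_of_nodup (h₂.filter _), List.toFinset_filter]
    congr 1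
    ext x
    simp
  rw [e1, e2, Finset.inter_comm]

theorem altPar_eq (pressed : List Bool) (N n : Int) (P : List Int)
    (hn : 1 ≤ n) (hP : ∀ k ∈ P, n < k ∧ k ≤ N) (hnd : P.Nodup)
    (hpr : ∀ m : Int, 0 ≤ m → m ≤ N → PySem.List.pyGetD pressed m false = decide (m ∈ P)) :
    altPar pressed N n = (P.countP (fun k => decide (n ∣ k)) % 2 == 1) := by
  unfold altPar
  rw [foldl_flip_parity]
  have hmemR : ∀ m : Int, m ∈ PySem.List.pyRange (2*n) (N+1) n ↔
      2*n ≤ m ∧ m < N+1 ∧ n ∣ m - 2*n :=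
    PySem.List.mem_pyRange_iff_of_pos (by omega)
  have hndR : (PySem.List.pyRange (2*n) (N+1) n).Nodup := by
    rw [PySem.List.pyRange_of_pos _ _ (by omega : (0:Int) < n)]
    refine List.Nodup.map ?_ List.nodup_range
    intro a b hab
    dsimp only at hab
    have h2 : (n : Int) * a = n * b := by linarith
    have := mul_left_cancel₀ (show (n:Int) ≠ 0 by omega) h2
    exact_mod_cast this
  have h1 : (PySem.List.pyRange (2*n) (N+1) n).countP
        (fun m => PySem.List.pyGetD pressed m false)
      = (PySem.List.pyRange (2*n) (N+1) n).countP (fun m => decide (m ∈ P)) := by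
    refine List.countP_congr ?_
    intro m hm
    have := (hmemR m).mp hm
    rw [hpr m (by omega) (by omega)]
  have h2 : P.countP (fun k => decide (k ∈ PySem.List.pyRange (2*n) (N+1) n))
      = P.countP (fun k => decide (n ∣ k)) := by
    refine List.countP_congr ?_
    intro k hk
    have hb := hP k hk
    have : k ∈ PySem.List.pyRange (2*n) (N+1) n ↔ n ∣ k := by
      rw [hmemR k]
      constructor
      · rintro ⟨ha, hb2, c, hc⟩
        refine ⟨c + 2, ?_⟩
        have he : n * (c + 2) = n * c + 2 * n := by ring
        omega
      · rintro ⟨c, rfl⟩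
        have hc2 : 2 ≤ c := by
          by_contra hcon
          have h1 : c ≤ 1 := by omega
          have := mul_le_mul_of_nonneg_left h1 (show (0:Int) ≤ n by omega)
          omega
        have hr : n * (c - 2) = n * c - 2 * n := by ring
        have hnn : 0 ≤ n * (c - 2) := mul_nonneg (by omega) (by omega)
        exact ⟨by omega, by omega, ⟨c - 2, by ring⟩⟩
    simp [this]
  rw [h1, countP_mem_comm _ _ hndR hnd, h2]
  cases (P.countP (fun k => decide (n ∣ k)) % 2 == 1) <;> simp

theorem nodup_listaDivisori (v : Int) : (listaDivisori v).Nodup := by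
  unfold listaDivisori aggiuntaLista
  refine ((PySem.List.sorted_perm _ _ _).nodup_iff).mpr ?_
  exact nodup_aggiuntaListaLoop _ _ _ _ (List.Nodup.filter _ (PySem.List.nodup_pyRange_one _ _))

theorem mem_listaDivisori (v m : Int) (hv : 1 ≤ v) :
    m ∈ listaDivisori v ↔ 1 ≤ m ∧ m ∣ v := by
  unfold listaDivisori aggiuntaLista
  set s : Int := (Nat.sqrt v.toNat : Int) with hs
  set l0 : List Int := (PySem.List.pyRange 1 (s + 1) 1).filter
    (fun d => PySem.Int.mod v d == 0) with hl0
  have hmem0 : ∀ d : Int, d ∈ l0 ↔ (1 ≤ d ∧ d ≤ s ∧ d ∣ v) := by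
    intro d
    rw [hl0, List.mem_filter, PySem.List.mem_pyRange_one]
    constructor
    · rintro ⟨⟨h1, h2⟩, h3⟩
      exact ⟨h1, by omega, (PySem.Int.mod_eq_zero_iff_dvd v d).mp (by simpa using h3)⟩
    · rintro ⟨h1, h2, h3⟩
      exact ⟨⟨h1, by omega⟩, by simpa using (PySem.Int.mod_eq_zero_iff_dvd v d).mpr h3⟩
  have hvt : ((v.toNat : Int)) = v := Int.toNat_of_nonneg (by omega)
  have h0s : 0 ≤ s := by positivity
  have hsq1 : s * s ≤ v := by
    have h2 := Int.ofNat_le.mpr (Nat.sqrt_le' v.toNat)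
    push_cast at h2
    rw [hvt] at h2
    nlinarith [h2]
  have hsq2 : v < (s + 1) * (s + 1) := by
    have h2 := Int.ofNat_lt.mpr (Nat.lt_succ_sqrt' v.toNat)
    push_cast at h2
    rw [hvt] at h2
    nlinarith [h2]
  rw [(PySem.List.sorted_perm _ _ _).mem_iff, mem_aggiuntaListaLoop]
  constructor
  · rintro (hm | ⟨j, hj, rfl⟩)
    · obtain ⟨h1, _, h3⟩ := (hmem0 m).mp hm
      exact ⟨h1, h3⟩
    · have hjlen : j < l0.reverse.length := by simpa using hj
      have hget : PySem.List.pyGetD l0.reverse (j : Int) 0 = l0.reverse[j] := by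
        rw [PySem.List.pyGetD_natCast]
        exact List.getD_eq_getElem _ _ hjlen
      have hdl : l0.reverse[j] ∈ l0 := List.mem_reverse.mp (List.getElem_mem hjlen)
      obtain ⟨h1, h2, c, hc⟩ := (hmem0 _).mp hdl
      have hcq : PySem.Int.floordiv v l0.reverse[j] = c := by
        rw [PySem.Int.floordiv_eq_ediv_of_pos (by omega), hc,
          Int.mul_ediv_cancel_left _ (by omega)]
      rw [hget, hcq]
      have hc1 : 1 ≤ c := by
        by_contra hcon
        have : l0.reverse[j] * c ≤ 0 :=
          mul_nonpos_of_nonneg_of_nonpos (by omega) (by omega)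
        omega
      exact ⟨hc1, ⟨l0.reverse[j], by rw [hc]; ring⟩⟩
  · rintro ⟨h1, hdvd⟩
    by_cases hms : m ≤ s
    · exact Or.inl ((hmem0 m).mpr ⟨h1, hms, hdvd⟩)
    · obtain ⟨c, hc⟩ := hdvd
      have hc1 : 1 ≤ c := by
        by_contra hcon
        have : m * c ≤ 0 := mul_nonpos_of_nonneg_of_nonpos (by omega) (by omega)
        omega
      have hcs : c ≤ s := by
        by_contra hcon
        have hmm : (s + 1) * (s + 1) ≤ m * c :=
          mul_le_mul (by omega) (by omega) (by omega) (by omega)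
        omega
      have hcl : c ∈ l0 := (hmem0 c).mpr ⟨hc1, hcs, ⟨m, by rw [hc]; ring⟩⟩
      obtain ⟨j, hjlen, hj⟩ := List.mem_iff_getElem.mp (List.mem_reverse.mpr hcl)
      refine Or.inr ⟨j, by simpa using hjlen, ?_⟩
      have hget : PySem.List.pyGetD l0.reverse (j : Int) 0 = c := by
        rw [PySem.List.pyGetD_natCast]
        rw [List.getD_eq_getElem _ _ hjlen, hj]
      rw [hget, PySem.Int.floordiv_eq_ediv_of_pos (by omega), hc, mul_comm,
        Int.mul_ediv_cancel_left _ (by omega)]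

set_option maxHeartbeats 1000000 in
theorem loop_eq (ins : List Int) (N : Int) :
    ∀ (f : Nat) (n : Int) (S : PySem.Set Int) (pressed : List Bool) (P : List Int),
      n.toNat = f → n ≤ N →
      (∀ m : Int, 1 ≤ m →
        ((m ∈ S) ↔ ((m ∈ ins) ↔ P.countP (fun k => decide (m ∣ k)) % 2 = 0))) →
      pressed.length = (N + 1).toNat →
      (∀ m : Int, 0 ≤ m → m ≤ N → PySem.List.pyGetD pressed m false = decide (m ∈ P)) →
      (∀ k ∈ P, n < k ∧ k ≤ N) → P.Pairwise (· > ·) →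
      ∃ Q : List Int,
        es2Loop n S P = P ++ Q ∧
        ((PySem.List.pyRange n 0 (-1)).foldl (altStep ins N) (pressed, P)).2 = P ++ Q ∧
        (∀ k ∈ Q, 0 < k ∧ k ≤ n) ∧ Q.Pairwise (· > ·) := by
  intro f
  induction f with
  | zero =>
    intro n S pressed P hf hnN hInv hlen hpr hPb hPW
    refine ⟨[], ?_, ?_, by simp, List.Pairwise.nil⟩
    · rw [es2Loop]
      simp [show ¬ (0:Int) < n by omega]
    · rw [PySem.List.pyRange_neg_one_eq_nil (by omega : n ≤ 0)]
      simp only [List.foldl_nil, List.append_nil]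
  | succ f ih =>
    intro n S pressed P hf hnN hInv hlen hpr hPb hPW
    have hn1 : (1:Int) ≤ n := by omega
    have hndP : P.Nodup := hPW.imp ne_of_gt
    have hparB : altPar pressed N n = (P.countP (fun k => decide (n ∣ k)) % 2 == 1) :=
      altPar_eq pressed N n P hn1 hPb hndP hpr
    rw [es2Loop, if_pos (show (0:Int) < n by omega),
      PySem.List.pyRange_neg_one_cons (show (0:Int) < n by omega), List.foldl_cons]
    by_cases hcase : n ∈ S
    · -- not pressed: both loops keep their state
      have hA : PySem.Set.contains S n = true := by simp [PySem.Set.contains, hcase]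
      have hBc : (decide (n ∈ ins) == altPar pressed N n) = false := by
        rw [hparB]
        have h := (hInv n hn1).mp hcase
        by_cases hi : n ∈ ins
        · have hp : P.countP (fun k => decide (n ∣ k)) % 2 = 0 := h.mp hi
          simp [hi, hp]
        · have hp : P.countP (fun k => decide (n ∣ k)) % 2 ≠ 0 := fun hp => hi (h.mpr hp)
          have hp1 : P.countP (fun k => decide (n ∣ k)) % 2 = 1 := by omega
          simp [hi, hp1]
      rw [if_pos hA]
      have hstep : altStep ins N (pressed, P) n = (pressed, P) := by
        simp only [altStep, hBc]
        simp
      rw [hstep]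
      obtain ⟨Q, h1, h2, h3, h4⟩ := ih (n - 1) S pressed P (by omega) (by omega) hInv hlen hpr
        (fun k hk => ⟨by have := (hPb k hk).1; omega, (hPb k hk).2⟩) hPW
      exact ⟨Q, h1, h2, fun k hk => ⟨(h3 k hk).1, by have := (h3 k hk).2; omega⟩, h4⟩
    · -- pressed: both loops press n
      have hA : PySem.Set.contains S n = false := by simp [PySem.Set.contains, hcase]
      have hBc : (decide (n ∈ ins) == altPar pressed N n) = true := by
        rw [hparB]
        have h := hInv n hn1
        by_cases hi : n ∈ ins
        · have hp : P.countP (fun k => decide (n ∣ k)) % 2 ≠ 0 :=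
            fun hp => hcase (h.mpr (iff_of_true hi hp))
          have hp1 : P.countP (fun k => decide (n ∣ k)) % 2 = 1 := by omega
          simp [hi, hp1]
        · have hp : P.countP (fun k => decide (n ∣ k)) % 2 = 0 := by
            by_contra hp
            exact hcase (h.mpr (iff_of_false hi hp))
          simp [hi, hp]
      rw [if_neg (show ¬ PySem.Set.contains S n = true by rw [hA]; exact Bool.false_ne_true)]
      have hstep : altStep ins N (pressed, P) n = (PySem.List.pySetD pressed n true, P ++ [n]) := by
        simp only [altStep, hBc]
        simp
      rw [hstep]
      -- new invariants
      have hInv' : ∀ m : Int, 1 ≤ m →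
          ((m ∈ accensioneOSpegnimento (listaDivisori n) S) ↔
            ((m ∈ ins) ↔ (P ++ [n]).countP (fun k => decide (m ∣ k)) % 2 = 0)) := by
        intro m hm
        rw [mem_accensioneOSpegnimento, hInv m hm, List.countP_append]
        have hcountm : (listaDivisori n).count m = if m ∣ n then 1 else 0 := by
          by_cases hd : m ∣ n
          · rw [if_pos hd]
            exact List.count_eq_one_of_mem (nodup_listaDivisori n)
              ((mem_listaDivisori n m hn1).mpr ⟨hm, hd⟩)
          · rw [if_neg hd]
            exact List.count_eq_zero_of_not_mem
              (fun hc => hd ((mem_listaDivisori n m hn1).mp hc).2)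
        by_cases hd : m ∣ n
        · rw [hcountm, if_pos hd]
          have h1 : List.countP (fun k => decide (m ∣ k)) [n] = 1 := by simp [hd]
          rw [h1]
          rcases Nat.mod_two_eq_zero_or_one (P.countP (fun k => decide (m ∣ k))) with hp | hp <;>
            by_cases hi : m ∈ ins <;>
            simp [hi, hp, Nat.add_mod]
        · rw [hcountm, if_neg hd]
          have h1 : List.countP (fun k => decide (m ∣ k)) [n] = 0 := by simp [hd]
          rw [h1]
          simp
      have hlen' : (PySem.List.pySetD pressed n true).length = (N + 1).toNat := by
        rw [PySem.List.length_pySetD, hlen]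
      have hpr' : ∀ m : Int, 0 ≤ m → m ≤ N →
          PySem.List.pyGetD (PySem.List.pySetD pressed n true) m false
            = decide (m ∈ P ++ [n]) := by
        intro m hm0 hmN
        have hnn : ((n.toNat : Int)) = n := Int.toNat_of_nonneg (by omega)
        have hmm : ((m.toNat : Int)) = m := Int.toNat_of_nonneg hm0
        have hnlt : n.toNat < pressed.length := by rw [hlen]; omega
        have hkey := PySem.List.pyGetD_pySetD_natCast pressed n.toNat m.toNat true false hnlt
        rw [hnn, hmm] at hkey
        rw [hkey]
        by_cases hmn : m = n
        · have : m.toNat = n.toNat := by omega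
          simp [hmn]
        · have hne : m.toNat ≠ n.toNat := by omega
          rw [if_neg hne, hpr m hm0 hmN]
          simp [hmn]
      have hPb' : ∀ k ∈ P ++ [n], n - 1 < k ∧ k ≤ N := by
        intro k hk
        rcases List.mem_append.mp hk with hk | hk
        · exact ⟨by have := (hPb k hk).1; omega, (hPb k hk).2⟩
        · have : k = n := by simpa using hk
          omega
      have hPW' : (P ++ [n]).Pairwise (· > ·) := by
        rw [List.pairwise_append]
        refine ⟨hPW, List.pairwise_singleton _ _, ?_⟩
        intro a ha b hb
        have : b = n := by simpa using hb
        subst this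
        exact (hPb a ha).1
      obtain ⟨Q, h1, h2, h3, h4⟩ := ih (n - 1) _ _ _ (by omega) (by omega) hInv' hlen' hpr' hPb' hPW'
      refine ⟨n :: Q, ?_, ?_, ?_, ?_⟩
      · rw [h1]; simp
      · rw [h2]; simp
      · intro k hk
        rcases List.mem_cons.mp hk with rfl | hk
        · omega
        · have := h3 k hk; omega
      · rw [List.pairwise_cons]
        exact ⟨fun k hk => by have := (h3 k hk).2; omega, h4⟩

theorem es2_eq_alt (N : Int) (ins : List Int) : es2 N ins = es2_alt N ins := by
  by_cases hN : N ≤ 0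
  · rw [es2, es2Loop, if_neg (by omega : ¬ (0:Int) < N)]
    rw [es2_alt, if_pos hN]
    exact (PySem.List.sorted_eq_nil_iff _ _ _).mpr rfl
  · obtain ⟨Q, h1, h2, h3, h4⟩ := loop_eq ins N N.toNat N ins
      (List.replicate (N + 1).toNat false) [] rfl le_rfl
      (by intro m hm; simp)
      (by simp)
      (by
        intro m hm0 hmN
        have hmm : ((m.toNat : Int)) = m := Int.toNat_of_nonneg hm0
        rw [← hmm, PySem.List.pyGetD_natCast]
        simp)
      (by simp) List.Pairwise.nil
    rw [es2, h1, es2_alt, if_neg hN, h2]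
    simp only [List.nil_append]
    apply PySem.List.sorted_eq_of_perm_of_pairwise_lt
    · exact Q.reverse_perm
    · rw [List.pairwise_reverse]
      exact h4

-- ===== VERDICT (by name: the statement is the Claim_ definition above) =====
theorem es2_spec : Claim_equal_es2 := by
  intro N ins _
  unfold Spec_es2
  exact es2_eq_alt N ins
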